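-- pv_equiv track=rewrite | github.com/tianyu1997/box_aabb | v4/doc/viz_scene04_all.py | _shortcut_box_seq
-- ===== SOURCE A (Python) =====
-- def _shortcut_box_seq(box_seq, adj):
--     if len(box_seq) <= 2:
--         return box_seq
--     result = [box_seq[0]]
--     i = 0
--     n = len(box_seq)
--     while i < n - 1:
--         farthest = i + 1
--         nbrs = adj.get(box_seq[i], set())
--         for j in range(n - 1, i + 1, -1):
--             if box_seq[j] in nbrs:
--                 farthest = j
--                 break
--         result.append(box_seq[farthest])
--         i = farthest
--     return result
-- ===== SOURCE B (Python) =====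
-- def _shortcut_box_seq(box_seq, adj):
--     if len(box_seq) <= 2:
--         return box_seq
--     n = len(box_seq)
--     # one pass: last occurrence index of each value
--     last = {}
--     for idx, v in enumerate(box_seq):
--         last[v] = idx
--     result = [box_seq[0]]
--     i = 0
--     while i < n - 1:
--         cand = -1
--         for v in adj.get(box_seq[i], ()):
--             p = last.get(v, -1)
--             if cand < p:
--                 cand = p
--         farthest = cand if cand >= i + 2 else i + 1
--         result.append(box_seq[farthest])
--         i = farthest
--     return result
-- ===== Notes on version B (the rewrite author's own statement) =====
-- stated objective: faster
-- what changed: Replaces A's per-step backward scan over box_seq indices with a last-occurrence-index dictionary built in one pass, so each greedy step takes the max of last[v] over the current node's neighbors instead of rescanning the sequence.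
import Mathlib
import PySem

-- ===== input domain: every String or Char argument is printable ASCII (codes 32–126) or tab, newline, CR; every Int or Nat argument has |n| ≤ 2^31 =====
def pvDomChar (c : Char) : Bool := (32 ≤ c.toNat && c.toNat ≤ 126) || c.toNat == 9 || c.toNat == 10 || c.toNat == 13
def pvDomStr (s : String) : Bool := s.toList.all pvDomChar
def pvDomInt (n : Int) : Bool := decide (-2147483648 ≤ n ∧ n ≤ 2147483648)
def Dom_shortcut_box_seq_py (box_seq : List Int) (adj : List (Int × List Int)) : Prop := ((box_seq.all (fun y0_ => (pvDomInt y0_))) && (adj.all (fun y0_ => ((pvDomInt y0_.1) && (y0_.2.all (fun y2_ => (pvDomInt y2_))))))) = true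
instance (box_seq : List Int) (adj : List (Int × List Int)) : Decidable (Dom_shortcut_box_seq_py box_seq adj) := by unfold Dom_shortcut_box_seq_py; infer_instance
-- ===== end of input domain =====

-- B replaces A's per-step backward index scan with a last-occurrence dictionary built in one
-- pass, taking the max of last[v] over the current node's neighbors at each greedy step (faster).


-- ===== PORT A =====
-- for j in range(n-1, i+1, -1): if box_seq[j] in nbrs: farthest = j; break   (else farthest = i+1)
-- index j is always in range, so box_seq[j] is ported as seq.getD j 0 (exact here)
def findBackA (seq nbrs : List Int) (i j : Nat) : Nat :=
  if _h : i + 2 ≤ j then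
    if seq.getD j 0 ∈ nbrs then j else findBackA seq nbrs i (j - 1)
  else i + 1
termination_by j
decreasing_by omega

-- termination fact the while-loop port cites: each step strictly advances i
theorem findBackA_gt (seq nbrs : List Int) (i j : Nat) : i < findBackA seq nbrs i j := by
  induction j using Nat.strong_induction_on with
  | _ j ih =>
    rw [findBackA]
    split
    · split
      · omega
      · exact ih (j - 1) (by omega)
    · omega

-- the while loop of A (i advances to farthest; emits box_seq[farthest] each pass)
def loopA (seq : List Int) (adj : List (Int × List Int)) (n i : Nat) : List Int :=
  if _h : i < n - 1 then
    -- nbrs = adj.get(box_seq[i], set()); farthest = backward scan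
    seq.getD (findBackA seq (((PySem.Dict.mk adj).get? (seq.getD i 0)).getD []) i (n - 1)) 0 ::
      loopA seq adj n (findBackA seq (((PySem.Dict.mk adj).get? (seq.getD i 0)).getD []) i (n - 1))
  else []
termination_by n - i
decreasing_by exact Nat.sub_lt_sub_left (by omega) (findBackA_gt seq (((PySem.Dict.mk adj).get? (seq.getD i 0)).getD []) i (n - 1))

def shortcut_box_seq_py (box_seq : List Int) (adj : List (Int × List Int)) : List Int :=
  if box_seq.length ≤ 2 then box_seq
  else box_seq.getD 0 0 :: loopA box_seq adj box_seq.length 0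

-- ===== PORT B =====
-- last = {}; for idx, v in enumerate(box_seq): last[v] = idx
def buildLastB (seq : List Int) : PySem.Dict Int Int :=
  (PySem.List.enumerate seq 0).foldl (fun d p => d.insert p.2 p.1) PySem.Dict.empty

-- cand = -1; for v in nbrs: p = last.get(v, -1); if cand < p: cand = p
def maxCandB (last : PySem.Dict Int Int) (nbrs : List Int) : Int :=
  nbrs.foldl (fun m v => if m < last.getD v (-1) then last.getD v (-1) else m) (-1)

def loopB (seq : List Int) (adj : List (Int × List Int)) (last : PySem.Dict Int Int)
    (n i : Nat) : List Int :=
  if _h : i < n - 1 then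
    -- cand = folded max of last.get(v, -1); farthest = cand if cand >= i+2 else i+1
    seq.getD (if (i : Int) + 2 ≤ maxCandB last (((PySem.Dict.mk adj).get? (seq.getD i 0)).getD []) then (maxCandB last (((PySem.Dict.mk adj).get? (seq.getD i 0)).getD [])).toNat else i + 1) 0 ::
      loopB seq adj last n (if (i : Int) + 2 ≤ maxCandB last (((PySem.Dict.mk adj).get? (seq.getD i 0)).getD []) then (maxCandB last (((PySem.Dict.mk adj).get? (seq.getD i 0)).getD [])).toNat else i + 1)
  else []
termination_by n - i
decreasing_by split <;> omega

def shortcut_box_seq_py_alt (box_seq : List Int) (adj : List (Int × List Int)) : List Int :=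
  if box_seq.length ≤ 2 then box_seq
  else box_seq.getD 0 0 :: loopB box_seq adj (buildLastB box_seq) box_seq.length 0

-- ===== PRECONDITION & SPEC =====
def Spec_shortcut_box_seq_py (box_seq : List Int) (adj : List (Int × List Int)) (out : List Int) : Prop := out = shortcut_box_seq_py_alt box_seq adj
instance (box_seq : List Int) (adj : List (Int × List Int)) (out : List Int) : Decidable (Spec_shortcut_box_seq_py box_seq adj out) := by unfold Spec_shortcut_box_seq_py; infer_instance

-- ===== CLAIM (what is proved, stated in full; the proofs are below) =====
def Claim_equal_shortcut_box_seq_py : Prop := ∀ (box_seq : List Int) (adj : List (Int × List Int)), Dom_shortcut_box_seq_py box_seq adj → Spec_shortcut_box_seq_py box_seq adj (shortcut_box_seq_py box_seq adj)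

-- ===== LEMMAS AND PROOFS =====

-- the value each step folds over: last index of v in seq, as the fold over enumerate computes it
def lastVal (seq : List Int) (v : Int) : Int :=
  (PySem.List.enumerate seq 0).foldl (fun m p => if p.2 = v then p.1 else m) (-1)

theorem getD_foldl_insert_pairs (l : List (Int × Int)) (d : PySem.Dict Int Int) (v : Int) :
    (l.foldl (fun d p => d.insert p.2 p.1) d).getD v (-1)
      = l.foldl (fun m p => if p.2 = v then p.1 else m) (d.getD v (-1)) := by
  induction l generalizing d with
  | nil => rfl
  | cons p l ih =>
    simp only [List.foldl_cons, ih]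
    rw [PySem.Dict.getD_insert]
    by_cases h : v = p.2
    · simp [h]
    · simp [h, Ne.symm h]

theorem getD_buildLastB (seq : List Int) (v : Int) :
    (buildLastB seq).getD v (-1) = lastVal seq v := by
  unfold buildLastB lastVal
  rw [getD_foldl_insert_pairs]
  rw [PySem.Dict.getD_empty]

theorem lastVal_append (seq : List Int) (x v : Int) :
    lastVal (seq ++ [x]) v = if x = v then (seq.length : Int) else lastVal seq v := by
  unfold lastVal
  rw [PySem.List.enumerate_append, List.foldl_append]
  simp [PySem.List.enumerate_cons, PySem.List.enumerate_nil]

-- getD on an appended singleton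
theorem getD_append_lt (seq : List Int) (x : Int) (p : Nat) (h : p < seq.length) :
    (seq ++ [x]).getD p 0 = seq.getD p 0 := by
  simp [List.getD_eq_getElem?_getD, List.getElem?_append_left h]

theorem getD_append_len (seq : List Int) (x : Int) :
    (seq ++ [x]).getD seq.length 0 = x := by
  simp [List.getD_eq_getElem?_getD]

-- full characterisation of lastVal
theorem lastVal_spec (seq : List Int) (v : Int) :
    (lastVal seq v = -1 ∧ ∀ p : Nat, p < seq.length → seq.getD p 0 ≠ v) ∨
    (∃ k : Nat, lastVal seq v = (k : Int) ∧ k < seq.length ∧ seq.getD k 0 = v ∧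
      ∀ q : Nat, k < q → q < seq.length → seq.getD q 0 ≠ v) := by
  induction seq using List.reverseRecOn with
  | nil =>
    left
    refine ⟨rfl, ?_⟩
    intro p hp
    simp at hp
  | append_singleton seq x ih =>
    rw [lastVal_append]
    by_cases hx : x = v
    · right
      refine ⟨seq.length, by simp [hx], by simp, ?_, ?_⟩
      · rw [getD_append_len, hx]
      · intro q hq hlen
        simp at hlen
        omega
    · rw [if_neg hx]
      rcases ih with ⟨h1, h2⟩ | ⟨k, hk, hlt, hval, hmax⟩
      · left
        refine ⟨h1, ?_⟩
        intro p hp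
        simp at hp
        rcases Nat.lt_or_ge p seq.length with hp2 | hp2
        · rw [getD_append_lt _ _ _ hp2]; exact h2 p hp2
        · have : p = seq.length := by omega
          rw [this, getD_append_len]; exact hx
      · right
        refine ⟨k, hk, by simp; omega, ?_, ?_⟩
        · rw [getD_append_lt _ _ _ hlt]; exact hval
        · intro q hq hlen
          simp at hlen
          rcases Nat.lt_or_ge q seq.length with hq2 | hq2
          · rw [getD_append_lt _ _ _ hq2]; exact hmax q hq hq2
          · have : q = seq.length := by omega
            rw [this, getD_append_len]; exact hx

theorem lastVal_ge (seq : List Int) (v : Int) (p : Nat) (hp : p < seq.length)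
    (hv : seq.getD p 0 = v) : (p : Int) ≤ lastVal seq v := by
  rcases lastVal_spec seq v with ⟨_, h2⟩ | ⟨k, hk, _, _, hmax⟩
  · exact absurd hv (h2 p hp)
  · rw [hk]
    have : p ≤ k := by
      by_contra hc
      exact hmax p (by omega) hp hv
    exact_mod_cast this

-- generic facts about the running-max fold of B
theorem foldMax_init_le (last : PySem.Dict Int Int) (l : List Int) :
    ∀ init : Int, init ≤ l.foldl (fun m v => if m < last.getD v (-1) then last.getD v (-1) else m) init := by
  induction l with
  | nil => intro init; simp
  | cons a l ih =>
    intro init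
    rw [List.foldl_cons]
    refine le_trans ?_ (ih _)
    show init ≤ if init < last.getD a (-1) then last.getD a (-1) else init
    by_cases h : init < last.getD a (-1)
    · rw [if_pos h]; omega
    · rw [if_neg h]

theorem foldMax_ge_mem (last : PySem.Dict Int Int) (l : List Int) :
    ∀ init : Int, ∀ v ∈ l, last.getD v (-1) ≤
      l.foldl (fun m v => if m < last.getD v (-1) then last.getD v (-1) else m) init := by
  induction l with
  | nil => intro _ v hv; simp at hv
  | cons a l ih =>
    intro init v hv
    rcases List.mem_cons.mp hv with h | h
    · subst h
      rw [List.foldl_cons]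
      refine le_trans ?_ (foldMax_init_le last l _)
      show last.getD v (-1) ≤ if init < last.getD v (-1) then last.getD v (-1) else init
      by_cases h2 : init < last.getD v (-1)
      · rw [if_pos h2]
      · rw [if_neg h2]; omega
    · exact ih _ v h

theorem foldMax_cases (last : PySem.Dict Int Int) (l : List Int) :
    ∀ init : Int,
      l.foldl (fun m v => if m < last.getD v (-1) then last.getD v (-1) else m) init = init ∨
      ∃ v ∈ l, l.foldl (fun m v => if m < last.getD v (-1) then last.getD v (-1) else m) init
        = last.getD v (-1) := by
  induction l with
  | nil => intro init; left; rfl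
  | cons a l ih =>
    intro init
    simp only [List.foldl_cons]
    by_cases h : init < last.getD a (-1)
    · rw [if_pos h]
      rcases ih (last.getD a (-1)) with h2 | ⟨v, hv, h2⟩
      · right; exact ⟨a, List.mem_cons_self .., h2⟩
      · right; exact ⟨v, List.mem_cons_of_mem _ hv, h2⟩
    · rw [if_neg h]
      rcases ih init with h2 | ⟨v, hv, h2⟩
      · left; exact h2
      · right; exact ⟨v, List.mem_cons_of_mem _ hv, h2⟩

theorem maxCandB_ge (last : PySem.Dict Int Int) (nbrs : List Int) (v : Int) (hv : v ∈ nbrs) :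
    last.getD v (-1) ≤ maxCandB last nbrs :=
  foldMax_ge_mem last nbrs (-1) v hv

theorem maxCandB_cases (last : PySem.Dict Int Int) (nbrs : List Int) :
    maxCandB last nbrs = -1 ∨ ∃ v ∈ nbrs, maxCandB last nbrs = last.getD v (-1) :=
  foldMax_cases last nbrs (-1)

-- characterisation of A's backward scan
theorem findBackA_spec (seq nbrs : List Int) (i j : Nat) :
    (findBackA seq nbrs i j = i + 1 ∧ ∀ k : Nat, i + 2 ≤ k → k ≤ j → seq.getD k 0 ∉ nbrs) ∨
    (i + 2 ≤ findBackA seq nbrs i j ∧ findBackA seq nbrs i j ≤ j ∧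
      seq.getD (findBackA seq nbrs i j) 0 ∈ nbrs ∧
      ∀ k : Nat, findBackA seq nbrs i j < k → k ≤ j → seq.getD k 0 ∉ nbrs) := by
  induction j using Nat.strong_induction_on with
  | _ j ih =>
    rw [findBackA]
    split
    · rename_i h
      split
      · rename_i hm
        right
        exact ⟨h, le_refl j, hm, fun k hk1 hk2 => by omega⟩
      · rename_i hm
        rcases ih (j - 1) (by omega) with ⟨h1, h2⟩ | ⟨h1, h2, h3, h4⟩
        · left
          refine ⟨h1, ?_⟩
          intro k hk1 hk2
          by_cases hkj : k = j
          · subst hkj; exact hm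
          · exact h2 k hk1 (by omega)
        · right
          refine ⟨h1, by omega, h3, ?_⟩
          intro k hk1 hk2
          by_cases hkj : k = j
          · subst hkj; exact hm
          · exact h4 k hk1 (by omega)
    · rename_i h
      left
      exact ⟨rfl, fun k hk1 hk2 => by omega⟩

-- the per-step farthest indices agree
theorem step_eq (seq nbrs : List Int) (i : Nat) :
    findBackA seq nbrs i (seq.length - 1) =
      (if (i : Int) + 2 ≤ maxCandB (buildLastB seq) nbrs then
        (maxCandB (buildLastB seq) nbrs).toNat else i + 1) := by
  rcases findBackA_spec seq nbrs i (seq.length - 1) with ⟨hF, hnone⟩ | ⟨h1, h2, h3, hmax⟩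
  · have hneg : ¬ ((i : Int) + 2 ≤ maxCandB (buildLastB seq) nbrs) := by
      intro hc
      rcases maxCandB_cases (buildLastB seq) nbrs with h0 | ⟨v, hv, hveq⟩
      · rw [h0] at hc; omega
      · rw [hveq, getD_buildLastB] at hc
        rcases lastVal_spec seq v with ⟨hl1, _⟩ | ⟨k, hk, hklen, hkval, _⟩
        · rw [hl1] at hc; omega
        · rw [hk] at hc
          exact hnone k (by omega) (by omega) (hkval ▸ hv)
    rw [hF, if_neg hneg]
  · have hFlen : findBackA seq nbrs i (seq.length - 1) < seq.length := by omega
    have hub : (findBackA seq nbrs i (seq.length - 1) : Int) ≤ maxCandB (buildLastB seq) nbrs := by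
      have hge := maxCandB_ge (buildLastB seq) nbrs _ h3
      rw [getD_buildLastB] at hge
      exact le_trans (lastVal_ge seq _ _ hFlen rfl) hge
    have hlb : maxCandB (buildLastB seq) nbrs ≤ (findBackA seq nbrs i (seq.length - 1) : Int) := by
      rcases maxCandB_cases (buildLastB seq) nbrs with h0 | ⟨v, hv, hveq⟩
      · rw [h0]; omega
      · rw [hveq, getD_buildLastB]
        rcases lastVal_spec seq v with ⟨hl1, _⟩ | ⟨k, hk, hklen, hkval, _⟩
        · rw [hl1]; omega
        · rw [hk]
          have hkF : k ≤ findBackA seq nbrs i (seq.length - 1) := by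
            by_contra hc2
            exact hmax k (by omega) (by omega) (hkval ▸ hv)
          exact_mod_cast hkF
    have hceq : maxCandB (buildLastB seq) nbrs = (findBackA seq nbrs i (seq.length - 1) : Int) :=
      le_antisymm hlb hub
    rw [if_pos (by omega), hceq]
    exact (Int.toNat_natCast _).symm

theorem loop_eq (seq : List Int) (adj : List (Int × List Int)) (i : Nat) :
    loopA seq adj seq.length i = loopB seq adj (buildLastB seq) seq.length i := by
  have key : ∀ m : Nat, ∀ i : Nat, seq.length - i ≤ m →
      loopA seq adj seq.length i = loopB seq adj (buildLastB seq) seq.length i := by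
    intro m
    induction m with
    | zero =>
      intro i h
      rw [loopA, loopB, dif_neg (by omega), dif_neg (by omega)]
    | succ m ih =>
      intro i h
      rw [loopA, loopB]
      by_cases hc : i < seq.length - 1
      · rw [dif_pos hc, dif_pos hc, step_eq]
        congr 1
        apply ih
        have hgt : i < (if (i : Int) + 2 ≤ maxCandB (buildLastB seq)
            (((PySem.Dict.mk adj).get? (seq.getD i 0)).getD []) then
            (maxCandB (buildLastB seq) (((PySem.Dict.mk adj).get? (seq.getD i 0)).getD [])).toNat
          else i + 1) := by
          split <;> omega
        omega
      · rw [dif_neg hc, dif_neg hc]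
  exact key (seq.length - i) i (le_refl _)

-- ===== VERDICT (by name: the statement is the Claim_ definition above) =====
theorem shortcut_box_seq_py_spec : Claim_equal_shortcut_box_seq_py := by
  intro box_seq adj _
  unfold Spec_shortcut_box_seq_py shortcut_box_seq_py shortcut_box_seq_py_alt
  split
  · rfl
  · rw [loop_eq]
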